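-- pv_equiv track=rewrite | github.com/XcapeAxis/BalatroAI | sim/oracle/generate_p9_episode_trace.py | _validate_requirements
-- ===== SOURCE A (Python) =====
-- from typing import Any
--
-- def _validate_requirements(action_trace: list[dict[str, Any]]) -> tuple[bool, str]:
--     if len(action_trace) < 25:
--         return False, "requirement_failed:actions_lt_25"
--
--     counts: dict[str, int] = {}
--     for action in action_trace:
--         at = str(action.get("action_type") or "").upper()
--         counts[at] = counts.get(at, 0) + 1
--
--     checks = [
--         (counts.get("NEXT_ROUND", 0) >= 2, "next_round_lt_2"),
--         ((counts.get("PLAY", 0) + counts.get("DISCARD", 0)) >= 2, "hand_decisions_lt_2"),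
--         ((counts.get("REROLL", 0) + counts.get("BUY", 0) + counts.get("SELL", 0) + counts.get("SKIP", 0)) >= 2, "shop_actions_lt_2"),
--         (counts.get("PACK", 0) >= 1, "pack_lt_1"),
--         (counts.get("USE", 0) >= 1, "use_lt_1"),
--         (counts.get("SELECT", 0) >= 1, "blind_select_lt_1"),
--     ]
--     for ok, reason in checks:
--         if not ok:
--             return False, f"requirement_failed:{reason}"
--     return True, ""
-- ===== SOURCE B (Python) =====
-- from typing import Any
--
-- def _validate_requirements(action_trace: list[dict[str, Any]]) -> tuple[bool, str]:
--     if len(action_trace) < 25: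
--         return False, "requirement_failed:actions_lt_25"
--
--     def count(*types: str) -> int:
--         total = 0
--         for action in action_trace:
--             if str(action.get("action_type") or "").upper() in types:
--                 total += 1
--         return total
--
--     if count("NEXT_ROUND") < 2:
--         return False, "requirement_failed:next_round_lt_2"
--     if count("PLAY", "DISCARD") < 2:
--         return False, "requirement_failed:hand_decisions_lt_2"
--     if count("REROLL", "BUY", "SELL", "SKIP") < 2:
--         return False, "requirement_failed:shop_actions_lt_2"
--     if count("PACK") < 1:
--         return False, "requirement_failed:pack_lt_1"
--     if count("USE") < 1:
--         return False, "requirement_failed:use_lt_1"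
--     if count("SELECT") < 1:
--         return False, "requirement_failed:blind_select_lt_1"
--     return True, ""
-- ===== Notes on version B (the rewrite author's own statement) =====
-- stated objective: alternative
-- what changed: Replaces the precomputed counts dictionary and the data-driven checks table with a count(*types) helper that rescans the trace per requirement, checking each requirement inline with an early return.
import Mathlib
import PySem

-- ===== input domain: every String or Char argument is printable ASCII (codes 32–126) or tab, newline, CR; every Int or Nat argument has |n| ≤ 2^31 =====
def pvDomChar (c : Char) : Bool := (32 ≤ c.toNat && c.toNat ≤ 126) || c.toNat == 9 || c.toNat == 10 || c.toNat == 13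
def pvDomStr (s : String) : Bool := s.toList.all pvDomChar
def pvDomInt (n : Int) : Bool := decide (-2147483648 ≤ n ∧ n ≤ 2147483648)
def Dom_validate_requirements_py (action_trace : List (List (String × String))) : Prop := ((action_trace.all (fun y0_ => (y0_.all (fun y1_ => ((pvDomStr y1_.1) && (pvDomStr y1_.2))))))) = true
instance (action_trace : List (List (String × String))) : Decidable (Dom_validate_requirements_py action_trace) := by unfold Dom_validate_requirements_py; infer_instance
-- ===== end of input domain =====

-- B replaces A's precomputed counts dictionary + checks table with a per-requirement
-- count helper that rescans the trace, checking each requirement inline (objective: alternative).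


-- ===== PORT A =====
-- str(action.get("action_type") or "").upper(): values are strings, so `x or ""` is getD with "" (exact: "" is the only falsy string)
def pvNorm (action : List (String × String)) : String :=
  PySem.Str.upper ((PySem.Dict.mk action).getD "action_type" "")

-- the `for ok, reason in checks` loop with its early return
def pvChecksLoop : List (Bool × String) → Bool × String
  | [] => (true, "")
  | (ok, reason) :: rest =>
      if !ok then (false, "requirement_failed:" ++ reason) else pvChecksLoop rest

def validate_requirements_py (action_trace : List (List (String × String))) : Bool × String :=
  if action_trace.length < 25 then (false, "requirement_failed:actions_lt_25")
  else
    let counts : PySem.Dict String Int :=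
      action_trace.foldl (fun c a =>
        let at_ := pvNorm a
        c.insert at_ (c.getD at_ 0 + 1)) PySem.Dict.empty
    let checks : List (Bool × String) := [
      (decide (counts.getD "NEXT_ROUND" 0 ≥ 2), "next_round_lt_2"),
      (decide (counts.getD "PLAY" 0 + counts.getD "DISCARD" 0 ≥ 2), "hand_decisions_lt_2"),
      (decide (counts.getD "REROLL" 0 + counts.getD "BUY" 0 + counts.getD "SELL" 0 + counts.getD "SKIP" 0 ≥ 2), "shop_actions_lt_2"),
      (decide (counts.getD "PACK" 0 ≥ 1), "pack_lt_1"),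
      (decide (counts.getD "USE" 0 ≥ 1), "use_lt_1"),
      (decide (counts.getD "SELECT" 0 ≥ 1), "blind_select_lt_1")]
    pvChecksLoop checks

-- ===== PORT B =====
-- count(*types): one scan of the trace per call, adding 1 when the normalized type is among `types`
def pvCountB (action_trace : List (List (String × String))) (types : List String) : Int :=
  action_trace.foldl (fun total a => if types.contains (pvNorm a) then total + 1 else total) 0

def validate_requirements_py_alt (action_trace : List (List (String × String))) : Bool × String :=
  if action_trace.length < 25 then (false, "requirement_failed:actions_lt_25")
  else if pvCountB action_trace ["NEXT_ROUND"] < 2 then (false, "requirement_failed:next_round_lt_2")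
  else if pvCountB action_trace ["PLAY", "DISCARD"] < 2 then (false, "requirement_failed:hand_decisions_lt_2")
  else if pvCountB action_trace ["REROLL", "BUY", "SELL", "SKIP"] < 2 then (false, "requirement_failed:shop_actions_lt_2")
  else if pvCountB action_trace ["PACK"] < 1 then (false, "requirement_failed:pack_lt_1")
  else if pvCountB action_trace ["USE"] < 1 then (false, "requirement_failed:use_lt_1")
  else if pvCountB action_trace ["SELECT"] < 1 then (false, "requirement_failed:blind_select_lt_1")
  else (true, "")

-- ===== PRECONDITION & SPEC =====
def Spec_validate_requirements_py (action_trace : List (List (String × String))) (out : Bool × String) : Prop := out = validate_requirements_py_alt action_trace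
instance (action_trace : List (List (String × String))) (out : Bool × String) : Decidable (Spec_validate_requirements_py action_trace out) := by unfold Spec_validate_requirements_py; infer_instance

-- ===== CLAIM (what is proved, stated in full; the proofs are below) =====
def Claim_equal_validate_requirements_py : Prop := ∀ (action_trace : List (List (String × String))), Dom_validate_requirements_py action_trace → Spec_validate_requirements_py action_trace (validate_requirements_py action_trace)

-- ===== LEMMAS AND PROOFS =====

-- A's counts-dict lookup is a count over the normalized trace
lemma pv_getD_counts (l : List (List (String × String))) (v : String) :
    (l.foldl (fun c a => let at_ := pvNorm a; c.insert at_ (c.getD at_ 0 + 1))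
        (PySem.Dict.empty : PySem.Dict String Int)).getD v 0
      = ((l.map pvNorm).count v : Int) := by
  have h := PySem.Dict.getD_foldl_insert_add_one (l.map pvNorm)
      (PySem.Dict.empty : PySem.Dict String Int) v
  rw [List.foldl_map] at h
  simpa using h

-- B's single scan is a countP of membership
lemma pv_pvCountB_eq (l : List (List (String × String))) (types : List String) :
    pvCountB l types = (l.countP (fun a => types.contains (pvNorm a)) : Int) := by
  unfold pvCountB
  induction l using List.reverseRecOn with
  | nil => simp
  | append_singleton l a ih =>
    rw [List.foldl_append, List.countP_append, ih]
    by_cases h : pvNorm a ∈ types <;> simp [h]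

-- countP of membership in v :: ts splits off the count of v when v ∉ ts
lemma pv_countP_cons (l : List (List (String × String))) (v : String) (ts : List String)
    (hv : v ∉ ts) :
    l.countP (fun a => (v :: ts).contains (pvNorm a))
      = l.countP (fun a => pvNorm a == v) + l.countP (fun a => ts.contains (pvNorm a)) := by
  induction l with
  | nil => simp
  | cons a l ihl =>
    rw [List.countP_cons, List.countP_cons, List.countP_cons, ihl]
    by_cases hav : pvNorm a = v
    · simp [List.contains_eq_mem, hav, hv]
      omega
    · simp [List.contains_eq_mem, hav]
      omega

-- a membership countP splits into per-value counts when the value list has no duplicates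
lemma pv_countP_contains (l : List (List (String × String))) (types : List String)
    (h : types.Nodup) :
    l.countP (fun a => types.contains (pvNorm a))
      = (types.map (fun v => (l.map pvNorm).count v)).sum := by
  induction types with
  | nil => simp
  | cons v ts ih =>
    rcases List.nodup_cons.mp h with ⟨hv, hts⟩
    rw [List.map_cons, List.sum_cons, ← ih hts, pv_countP_cons l v ts hv,
        List.count, List.countP_map]
    rfl

-- ===== VERDICT (by name: the statement is the Claim_ definition above) =====
set_option maxHeartbeats 1000000 in
theorem validate_requirements_py_spec : Claim_equal_validate_requirements_py := by
  intro tr _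
  unfold Spec_validate_requirements_py validate_requirements_py validate_requirements_py_alt
  by_cases hlen : tr.length < 25
  · simp [hlen]
  · simp only [hlen, if_false]
    rw [pv_pvCountB_eq, pv_pvCountB_eq, pv_pvCountB_eq, pv_pvCountB_eq, pv_pvCountB_eq,
        pv_pvCountB_eq,
        pv_countP_contains _ _ (by decide), pv_countP_contains _ _ (by decide),
        pv_countP_contains _ _ (by decide), pv_countP_contains _ _ (by decide),
        pv_countP_contains _ _ (by decide), pv_countP_contains _ _ (by decide)]
    simp only [pv_getD_counts, List.map_cons, List.map_nil, List.sum_cons, List.sum_nil,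
      add_zero]
    generalize (tr.map pvNorm).count "NEXT_ROUND" = n1
    generalize (tr.map pvNorm).count "PLAY" = n2
    generalize (tr.map pvNorm).count "DISCARD" = n3
    generalize (tr.map pvNorm).count "REROLL" = n4
    generalize (tr.map pvNorm).count "BUY" = n5
    generalize (tr.map pvNorm).count "SELL" = n6
    generalize (tr.map pvNorm).count "SKIP" = n7
    generalize (tr.map pvNorm).count "PACK" = n8
    generalize (tr.map pvNorm).count "USE" = n9
    generalize (tr.map pvNorm).count "SELECT" = n10
    simp only [pvChecksLoop]
    push_cast
    simp [not_le, add_assoc]
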